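-- pv_equiv track=rewrite | github.com/JBAujogue/ASN-Incidents | data/label-explorer/src/tmtools/parse/docx.py | make_toc_as_dict
-- ===== SOURCE A (Python) =====
-- def make_toc_as_dict(toc):
--     '''extract the Table Of Content from a docx file, under the form of a dict
--
--        {'0' : [title_of_document],
--         '1' : [title_of_document, section_title],
--         '1.1' : [title_of_document, section_title, subsection_title],
--         '1.2' : [title_of_document, section_title, subsection_title],
--         '1.2.1' : [title_of_document, section_title, subsection_title, paragraph_title],
--         ...}
--
--        Each pair corresponds to a section / subsection / paragraph title,
--        the digit corresponds to the numeration of the title in the docx file,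
--        and the list gives the content of each parent title
--     '''
--     atoc = {title_num: [
--             title2 for title_num2, title2 in toc
--             if title_num.startswith(title_num2)
--         ]
--         for title_num, _ in toc
--     }
--     return atoc
-- ===== SOURCE B (Python) =====
-- def _build_index(toc):
--     # map each numbering string to the list of (position, title) pairs bearing it
--     idx = {}
--     for i, (num, title) in enumerate(toc):
--         idx.setdefault(num, []).append((i, title))
--     return idx
--
--
-- def _key_lengths(toc):
--     # the only prefix lengths worth looking up: lengths of numberings present
--     return sorted(set(len(num) for num, _ in toc))
--
--
-- def _titles(idx, num, lens):
--     # a numbering num2 satisfies num.startswith(num2) iff num2 == num[:k] with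
--     # k = len(num2) <= len(num), so look up those prefixes and merge the hits
--     # back into document order
--     entries = []
--     for k in lens:
--         if k <= len(num):
--             entries.extend(idx.get(num[:k], []))
--     entries.sort(key=lambda e: e[0])
--     return [title for _, title in entries]
--
--
-- def make_toc_as_dict(toc):
--     idx = _build_index(toc)
--     lens = _key_lengths(toc)
--     out = {}
--     for num, _ in toc:
--         if num not in out:
--             out[num] = _titles(idx, num, lens)
--     return out
-- ===== Notes on version B (the rewrite author's own statement) =====
-- stated objective: faster
-- what changed: Instead of scanning the whole toc once per entry to test startswith, B builds a position index keyed by numbering string once, then for each key looks up only the prefixes num[:k] for the key lengths k actually present and merges the hits back into document order.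
import Mathlib
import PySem

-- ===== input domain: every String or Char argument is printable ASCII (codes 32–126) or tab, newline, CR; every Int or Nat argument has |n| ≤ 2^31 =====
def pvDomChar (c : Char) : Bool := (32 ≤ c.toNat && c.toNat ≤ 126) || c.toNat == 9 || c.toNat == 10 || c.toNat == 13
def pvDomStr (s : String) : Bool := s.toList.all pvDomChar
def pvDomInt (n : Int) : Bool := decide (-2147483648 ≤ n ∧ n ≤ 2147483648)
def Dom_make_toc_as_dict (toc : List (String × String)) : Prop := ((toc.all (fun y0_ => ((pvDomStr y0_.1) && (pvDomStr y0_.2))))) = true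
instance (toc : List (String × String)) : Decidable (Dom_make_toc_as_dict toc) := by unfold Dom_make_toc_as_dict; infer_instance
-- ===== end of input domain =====

-- B replaces A's per-entry scan of the whole toc by a position index keyed by numbering
-- string, looked up at each key's prefix substrings and merged back into document order.


-- ===== PORT A =====
-- dict comprehension: for each (title_num, _) key, one full scan of toc collecting the
-- titles whose numbering is a string prefix of title_num
def make_toc_as_dict (toc : List (String × String)) : List (String × List String) :=
  (toc.foldl (fun d p =>
      d.insert p.1 (toc.foldl (fun acc q =>
        if PySem.Str.startswith p.1 q.1 then acc ++ [q.2] else acc) ([] : List String)))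
    PySem.Dict.empty).items

-- ===== PORT B =====
-- _build_index: idx.setdefault(num, []).append((i, title)) over enumerate(toc)
def bIndex (toc : List (String × String)) : PySem.Dict String (List (Int × String)) :=
  (PySem.List.enumerate toc).foldl
    (fun d e => d.modify e.2.1 [] (· ++ [(e.1, e.2.2)])) PySem.Dict.empty

-- _key_lengths: sorted(set(len(num) for num, _ in toc))
def bLens (toc : List (String × String)) : List Int :=
  PySem.List.sorted (PySem.Set.ofList (toc.map (fun q => PySem.Str.len q.1))) (fun k => k) false

-- _titles: extend entries with idx.get(num[:k], []) for the occurring lengths k <= len(num),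
-- sort by position, keep the titles
def bTitles (idx : PySem.Dict String (List (Int × String))) (num : String) (lens : List Int) :
    List String :=
  (PySem.List.sorted
     (lens.foldl
        (fun acc k =>
          if k ≤ PySem.Str.len num then acc ++ idx.getD (PySem.Str.slice num none (some k)) []
          else acc) [])
     (fun e => e.1) false).map (·.2)

def make_toc_as_dict_alt (toc : List (String × String)) : List (String × List String) :=
  (toc.foldl (fun d p =>
      if d.contains p.1 then d else d.insert p.1 (bTitles (bIndex toc) p.1 (bLens toc)))
    PySem.Dict.empty).items

-- ===== PRECONDITION & SPEC =====
def Spec_make_toc_as_dict (toc : List (String × String)) (out : List (String × List String)) : Prop := out = make_toc_as_dict_alt toc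
instance (toc : List (String × String)) (out : List (String × List String)) : Decidable (Spec_make_toc_as_dict toc out) := by unfold Spec_make_toc_as_dict; infer_instance

-- ===== CLAIM (what is proved, stated in full; the proofs are below) =====
def Claim_equal_make_toc_as_dict : Prop := ∀ (toc : List (String × String)), Dom_make_toc_as_dict toc → Spec_make_toc_as_dict toc (make_toc_as_dict toc)

-- ===== LEMMAS AND PROOFS =====

-- the value stored under each key, shared characterisation of both programs
def tocVal (toc : List (String × String)) (num : String) : List String :=
  (toc.filter (fun q => PySem.Str.startswith num q.1)).map (·.2)

-- the prefix substrings num[:k] that B looks up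
def tocPrefixes (toc : List (String × String)) (num : String) : List String :=
  ((bLens toc).filter (fun k => decide (k ≤ PySem.Str.len num))).map
    (fun k => PySem.Str.slice num none (some k))

lemma mem_bLens_iff (toc : List (String × String)) (k : Int) :
    k ∈ bLens toc ↔ ∃ q ∈ toc, k = PySem.Str.len q.1 := by
  unfold bLens
  rw [PySem.List.mem_sorted, PySem.Set.mem_ofList]
  simp [eq_comm]

lemma bLens_nodup (toc : List (String × String)) : (bLens toc).Nodup := by
  unfold bLens
  have hp : (PySem.List.sorted (PySem.Set.ofList (toc.map (fun q => PySem.Str.len q.1)))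
      (fun k : Int => k) false).Perm (PySem.Set.ofList (toc.map (fun q => PySem.Str.len q.1))) :=
    PySem.List.sorted_perm _ _ _
  exact hp.symm.nodup (PySem.Set.nodup_ofList _)

lemma toList_prefix_slice (num : String) (k : Int) (hk : 0 ≤ k) :
    (PySem.Str.slice num none (some k)).toList = num.toList.take k.toNat := by
  rw [PySem.Str.toList_slice, PySem.Chars.slice_eq_listSlice, PySem.List.slice_to _ hk]

lemma tocPrefixes_nodup (toc : List (String × String)) (num : String) :
    (tocPrefixes toc num).Nodup := by
  unfold tocPrefixes
  refine (List.nodup_map_iff_inj_on ((bLens_nodup toc).filter _)).mpr ?_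
  intro x hx y hy hxy
  have hx' := List.mem_filter.mp hx
  have hy' := List.mem_filter.mp hy
  obtain ⟨qx, _, hqx⟩ := (mem_bLens_iff toc x).mp hx'.1
  obtain ⟨qy, _, hqy⟩ := (mem_bLens_iff toc y).mp hy'.1
  have hx0 : 0 ≤ x := by rw [hqx, PySem.Str.len_eq]; exact Int.natCast_nonneg _
  have hy0 : 0 ≤ y := by rw [hqy, PySem.Str.len_eq]; exact Int.natCast_nonneg _
  have hxle : x ≤ PySem.Str.len num := by simpa using hx'.2
  have hyle : y ≤ PySem.Str.len num := by simpa using hy'.2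
  rw [PySem.Str.len_eq] at hxle hyle
  have := congrArg String.toList hxy
  rw [toList_prefix_slice num x hx0, toList_prefix_slice num y hy0] at this
  have hlx := congrArg List.length this
  simp only [List.length_take] at hlx
  omega

lemma mem_tocPrefixes_iff (toc : List (String × String)) (num n : String)
    (hn : PySem.Str.len n ∈ bLens toc) :
    n ∈ tocPrefixes toc num ↔ PySem.Str.startswith num n = true := by
  rw [PySem.Str.startswith_eq, PySem.Chars.startswith_iff]
  unfold tocPrefixes
  simp only [List.mem_map, List.mem_filter, decide_eq_true_eq]
  constructor
  · rintro ⟨k, ⟨hkmem, hkle⟩, rfl⟩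
    obtain ⟨q, _, hq⟩ := (mem_bLens_iff toc k).mp hkmem
    have hk0 : 0 ≤ k := by rw [hq, PySem.Str.len_eq]; exact Int.natCast_nonneg _
    rw [toList_prefix_slice num k hk0]
    exact List.take_prefix _ num.toList
  · intro h
    refine ⟨PySem.Str.len n, ⟨hn, ?_⟩, ?_⟩
    · rw [PySem.Str.len_eq, PySem.Str.len_eq]
      exact_mod_cast h.length_le
    · apply String.toList_inj.mp
      rw [toList_prefix_slice num _ (by rw [PySem.Str.len_eq]; exact Int.natCast_nonneg _)]
      rw [PySem.Str.len_eq]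
      simp only [Int.toNat_natCast]
      exact (List.prefix_iff_eq_take.mp h).symm

lemma snd_mem_of_mem_enumerate (toc : List (String × String)) (e : Int × (String × String))
    (he : e ∈ PySem.List.enumerate toc 0) : e.2 ∈ toc := by
  obtain ⟨k, hk, rfl⟩ := (PySem.List.mem_enumerate_iff toc 0 e).mp he
  exact List.getElem_mem hk

-- closed form of the index B builds
lemma idx_getD (toc : List (String × String)) (key : String) :
    (bIndex toc).getD key [] =
      ((PySem.List.enumerate toc).filter (fun e => e.2.1 == key)).map (fun e => (e.1, e.2.2)) := by
  unfold bIndex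
  rw [← List.foldl_map (f := fun e : Int × (String × String) => (e.2.1, (e.1, e.2.2)))
      (g := fun (d : PySem.Dict String (List (Int × String))) p => d.modify p.1 [] (· ++ [p.2]))]
  rw [PySem.Dict.getD_foldl_modify_append]
  simp [List.filter_map, List.map_map, Function.comp_def]

-- concatenating the per-prefix buckets is a permutation of one filtered pass
lemma flatMap_ite_perm {α κ : Type} [DecidableEq κ] (a : κ) (x : α) (g : κ → List α) :
    ∀ (ps : List κ), ps.Nodup →
    (ps.flatMap (fun p => if a = p then x :: g p else g p)).Perm
      (if a ∈ ps then x :: ps.flatMap g else ps.flatMap g) := by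
  intro ps
  induction ps with
  | nil => simp
  | cons p ps ih =>
    intro hnd
    rcases List.nodup_cons.mp hnd with ⟨hp, hnd'⟩
    simp only [List.flatMap_cons, List.mem_cons]
    by_cases h : a = p
    · subst h
      rw [if_pos rfl, if_pos (Or.inl rfl)]
      have hg : ps.flatMap (fun q => if a = q then x :: g q else g q) = ps.flatMap g := by
        apply List.flatMap_congr
        intro q hq
        have hne : a ≠ q := by rintro rfl; exact hp hq
        rw [if_neg hne]
      rw [hg]
      simp [List.cons_append]
    · rw [if_neg h]
      by_cases hm : a ∈ ps
      · rw [if_pos (Or.inr hm)]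
        have h1 : (ps.flatMap (fun q => if a = q then x :: g q else g q)).Perm
            (x :: ps.flatMap g) := by
          have h2 := ih hnd'; rwa [if_pos hm] at h2
        exact (h1.append_left (g p)).trans List.perm_middle
      · rw [if_neg (by tauto)]
        have h1 := ih hnd'
        rw [if_neg hm] at h1
        exact h1.append_left (g p)

lemma flatMap_filter_perm {α κ : Type} [DecidableEq κ] (ps : List κ) (hnd : ps.Nodup) (f : α → κ) :
    ∀ l : List α,
    (ps.flatMap (fun p => l.filter (fun x => decide (f x = p)))).Perm
      (l.filter (fun x => decide (f x ∈ ps))) := by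
  intro l
  induction l with
  | nil => simp
  | cons x xs ih =>
    simp only [List.filter_cons, decide_eq_true_eq]
    have hmid := flatMap_ite_perm (f x) x
      (fun p => xs.filter (fun y => decide (f y = p))) ps hnd
    by_cases h : f x ∈ ps
    · rw [if_pos h] at hmid
      rw [if_pos h]
      exact hmid.trans (ih.cons x)
    · rw [if_neg h] at hmid
      rw [if_neg h]
      exact hmid.trans ih

-- dropping the positions recovers the titles in toc order
lemma enum_filter_map (p : String × String → Bool) :
    ∀ (xs : List (String × String)) (s : Int),
    ((PySem.List.enumerate xs s).filter (fun e => p e.2)).map (fun e => e.2.2) =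
      (xs.filter p).map (·.2) := by
  intro xs
  induction xs with
  | nil => intro s; simp [PySem.List.enumerate_nil]
  | cons x xs ih =>
    intro s
    rw [PySem.List.enumerate_cons]
    by_cases h : p x <;> simp [h, ih (s + 1)]

-- B's per-key value equals A's per-key value
lemma titles_eq (toc : List (String × String)) (num : String) :
    bTitles (bIndex toc) num (bLens toc) = tocVal toc num := by
  unfold bTitles
  rw [PySem.List.foldl_ite_eq_foldl_filter, PySem.List.foldl_append_eq_flatMap,
    List.nil_append]
  have hbody : ∀ k : Int,
      (bIndex toc).getD (PySem.Str.slice num none (some k)) [] =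
        ((PySem.List.enumerate toc).filter
            (fun e => e.2.1 == PySem.Str.slice num none (some k))).map
          (fun e => (e.1, e.2.2)) := fun k => idx_getD toc _
  rw [List.flatMap_congr (fun k _ => hbody k)]
  have target_pair :
      (PySem.List.sorted
        (((bLens toc).filter (fun k => decide (k ≤ PySem.Str.len num))).flatMap (fun k : Int =>
          ((PySem.List.enumerate toc).filter
              (fun e => e.2.1 == PySem.Str.slice num none (some k))).map
            (fun e => (e.1, e.2.2))))
        (fun e => e.1) false) =
      ((PySem.List.enumerate toc).filter
          (fun e => PySem.Str.startswith num e.2.1)).map (fun e => (e.1, e.2.2)) := by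
    apply PySem.List.sorted_eq_of_perm_of_pairwise_lt
    · -- permutation
      have h1 : ((bLens toc).filter (fun k => decide (k ≤ PySem.Str.len num))).flatMap
            (fun k : Int =>
            ((PySem.List.enumerate toc).filter
                (fun e => e.2.1 == PySem.Str.slice num none (some k))).map
              (fun e => (e.1, e.2.2))) =
          ((tocPrefixes toc num).flatMap (fun p =>
            (PySem.List.enumerate toc).filter (fun e => decide (e.2.1 = p)))).map
            (fun e => (e.1, e.2.2)) := by
        rw [List.map_flatMap]
        unfold tocPrefixes
        rw [List.flatMap_map]
        apply List.flatMap_congr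
        intro k _
        congr 1
      rw [h1]
      refine List.Perm.map _ ?_
      have h2 := flatMap_filter_perm (tocPrefixes toc num) (tocPrefixes_nodup toc num)
        (fun e : Int × (String × String) => e.2.1) (PySem.List.enumerate toc)
      have h3 : (PySem.List.enumerate toc).filter
            (fun e => decide (e.2.1 ∈ tocPrefixes toc num)) =
          (PySem.List.enumerate toc).filter
            (fun e => PySem.Str.startswith num e.2.1) := by
        apply List.filter_congr
        intro e he
        have hlen : PySem.Str.len e.2.1 ∈ bLens toc :=
          (mem_bLens_iff toc _).mpr ⟨e.2, snd_mem_of_mem_enumerate toc e he, rfl⟩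
        simp [mem_tocPrefixes_iff toc num e.2.1 hlen]
      exact (h2.trans (h3 ▸ List.Perm.refl _)).symm
    · -- strictly increasing positions
      refine List.Pairwise.map _ (fun a b h => h) ?_
      exact ((PySem.List.pairwise_lt_enumerate toc 0).sublist List.filter_sublist)
  rw [target_pair, List.map_map]
  unfold tocVal
  have := enum_filter_map (fun q => PySem.Str.startswith num q.1) toc 0
  simpa using this

-- inserting an already-stored binding is a no-op
lemma insert_same (d : PySem.Dict String (List String)) (hnd : d.keys.Nodup)
    (k : String) (v : List String) (h : d.get? k = some v) : d.insert k v = d := by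
  apply PySem.Dict.ext
  have hc : d.contains k = true := by
    rw [PySem.Dict.contains_eq_isSome_get?, h]; rfl
  rw [PySem.Dict.items_insert_of_contains d v hc]
  conv_rhs => rw [← List.map_id d.items]
  apply List.map_congr_left
  intro p hp
  by_cases hk : (p.1 == k) = true
  · have hk' : p.1 = k := beq_iff_eq.mp hk
    have hg := PySem.Dict.get?_of_mem_items d (k := p.1) (v := p.2)
      (by rw [Prod.mk.eta]; exact hp) hnd
    rw [hk', h] at hg
    have hv : v = p.2 := Option.some.inj hg
    rw [if_pos hk, ← hk', hv]
    simp
  · rw [if_neg hk]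
    rfl

-- the unconditional-insert loop and the skip-if-present loop build the same dict
lemma fold_guard (V : String → List String) :
    ∀ (ts : List (String × String)) (d : PySem.Dict String (List String)),
      d.keys.Nodup → (∀ k, d.contains k = true → d.get? k = some (V k)) →
      ts.foldl (fun d p => d.insert p.1 (V p.1)) d =
        ts.foldl (fun d p => if d.contains p.1 then d else d.insert p.1 (V p.1)) d := by
  intro ts
  induction ts with
  | nil => intro d _ _; rfl
  | cons p ts ih =>
    intro d hnd hv
    simp only [List.foldl_cons]
    by_cases hc : d.contains p.1
    · rw [if_pos hc, insert_same d hnd p.1 (V p.1) (hv p.1 hc)]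
      exact ih d hnd hv
    · rw [if_neg hc]
      refine ih _ (PySem.Dict.nodup_keys_insert _ _ _ hnd) ?_
      intro k hk
      by_cases he : k = p.1
      · subst he; rw [PySem.Dict.get?_insert_self]
      · rw [PySem.Dict.get?_insert_of_ne _ _ he]
        rw [PySem.Dict.contains_insert] at hk
        have : d.contains k := by
          cases hbe : (k == p.1) with
          | true => exact absurd (beq_iff_eq.mp hbe) he
          | false => rw [hbe] at hk; simpa using hk
        exact hv k this

-- ===== VERDICT (by name: the statement is the Claim_ definition above) =====
theorem make_toc_as_dict_spec : Claim_equal_make_toc_as_dict := by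
  intro toc _
  unfold Spec_make_toc_as_dict make_toc_as_dict make_toc_as_dict_alt
  have hA : (fun (d : PySem.Dict String (List String)) (p : String × String) =>
      d.insert p.1 (toc.foldl (fun acc q =>
        if PySem.Str.startswith p.1 q.1 then acc ++ [q.2] else acc) ([] : List String))) =
      fun d p => d.insert p.1 (tocVal toc p.1) := by
    funext d p
    rw [PySem.List.foldl_append_if, List.nil_append]
    rfl
  have hB : (fun (d : PySem.Dict String (List String)) (p : String × String) =>
      if d.contains p.1 then d else d.insert p.1 (bTitles (bIndex toc) p.1 (bLens toc))) =
      fun d p => if d.contains p.1 then d else d.insert p.1 (tocVal toc p.1) := by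
    funext d p
    rw [titles_eq]
  rw [hA, hB]
  congr 1
  exact fold_guard (tocVal toc) toc PySem.Dict.empty
    (by simp) (by intro k hk; simp [PySem.Dict.contains_empty] at hk)
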